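-- pv_equiv track=rewrite | github.com/AliHezarpisheh/py-learning | src/hackerrank/game_of_two_stacks.py | twoStacks
-- ===== SOURCE A (Python) =====
-- from collections import deque
--
-- def twoStacks(maxSum: int, a: list[int], b: list[int]) -> int:
--     a, b = deque(a), deque(b)
--     sum_numbers = 0
--     count_numbers = 0
--     while a or b:
--         top_a = a[0] if a else float("inf")
--         top_b = b[0] if b else float("inf")
--         number = a.popleft() if top_a <= top_b else b.popleft()
--
--         if sum_numbers + number > maxSum:
--             return count_numbers
--
--         sum_numbers += number
--         count_numbers += 1
--     return count_numbers
-- ===== SOURCE B (Python) =====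
-- def twoStacks(maxSum: int, a: list[int], b: list[int]) -> int:
--     # phase 1: build the full merged sequence (ties take from a)
--     merged = []
--     i = j = 0
--     while i < len(a) and j < len(b):
--         if a[i] <= b[j]:
--             merged.append(a[i]); i += 1
--         else:
--             merged.append(b[j]); j += 1
--     merged.extend(a[i:])
--     merged.extend(b[j:])
--     # phase 2: count the longest takeable prefix
--     total = 0
--     count = 0
--     for n in merged:
--         if total + n > maxSum:
--             break
--         total += n
--         count += 1
--     return count
-- ===== Notes on version B (the rewrite author's own statement) =====
-- stated objective: alternative
-- what changed: Splits A's single interleaved pop-and-accumulate loop into two phases: first build the fully merged sequence of the two lists, then a separate scan counts the longest prefix whose running sum stays within maxSum.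
import Mathlib
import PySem

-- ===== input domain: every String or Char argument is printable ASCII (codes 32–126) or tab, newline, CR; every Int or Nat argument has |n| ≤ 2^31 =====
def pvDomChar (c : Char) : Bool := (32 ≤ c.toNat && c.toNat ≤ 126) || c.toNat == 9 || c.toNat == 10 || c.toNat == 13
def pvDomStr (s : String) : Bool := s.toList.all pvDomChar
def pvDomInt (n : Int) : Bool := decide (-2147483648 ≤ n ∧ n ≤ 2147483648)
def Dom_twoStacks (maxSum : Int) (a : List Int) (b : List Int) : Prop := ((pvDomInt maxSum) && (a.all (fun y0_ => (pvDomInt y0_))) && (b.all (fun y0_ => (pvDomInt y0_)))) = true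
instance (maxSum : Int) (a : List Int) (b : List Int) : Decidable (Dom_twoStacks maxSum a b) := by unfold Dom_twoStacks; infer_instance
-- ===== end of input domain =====

-- B is an alternative decomposition: A's single interleaved pop-and-accumulate loop becomes
-- build-the-merged-sequence then a separate prefix-sum counting scan (same cost, return value only).

-- ===== PORT A =====
-- one step per Python loop iteration: empty/empty ends, else compare tops (missing top = +inf)
def twoStacksLoop (maxSum : Int) : List Int → List Int → Int → Int → Int
  | [], [], _, count => count
  | [], y :: ys, sum, count =>
      if sum + y > maxSum then count else twoStacksLoop maxSum [] ys (sum + y) (count + 1)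
  | x :: xs, [], sum, count =>
      if sum + x > maxSum then count else twoStacksLoop maxSum xs [] (sum + x) (count + 1)
  | x :: xs, y :: ys, sum, count =>
      if x ≤ y then
        (if sum + x > maxSum then count else twoStacksLoop maxSum xs (y :: ys) (sum + x) (count + 1))
      else
        (if sum + y > maxSum then count else twoStacksLoop maxSum (x :: xs) ys (sum + y) (count + 1))

def twoStacks (maxSum : Int) (a : List Int) (b : List Int) : Int :=
  twoStacksLoop maxSum a b 0 0

-- ===== PORT B =====
-- phase 1: merge the two lists, ties taking from a
def mergeAB : List Int → List Int → List Int
  | [], b => b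
  | a, [] => a
  | x :: xs, y :: ys =>
      if x ≤ y then x :: mergeAB xs (y :: ys) else y :: mergeAB (x :: xs) ys

-- phase 2: count the longest prefix whose running sum stays ≤ maxSum
def scanCount (maxSum : Int) : List Int → Int → Int → Int
  | [], _, count => count
  | n :: rest, total, count =>
      if total + n > maxSum then count else scanCount maxSum rest (total + n) (count + 1)

def twoStacks_alt (maxSum : Int) (a : List Int) (b : List Int) : Int :=
  scanCount maxSum (mergeAB a b) 0 0

-- ===== PRECONDITION & SPEC =====
def Spec_twoStacks (maxSum : Int) (a : List Int) (b : List Int) (out : Int) : Prop := out = twoStacks_alt maxSum a b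
instance (maxSum : Int) (a : List Int) (b : List Int) (out : Int) : Decidable (Spec_twoStacks maxSum a b out) := by unfold Spec_twoStacks; infer_instance

-- ===== CLAIM (what is proved, stated in full; the proofs are below) =====
def Claim_equal_twoStacks : Prop := ∀ (maxSum : Int) (a : List Int) (b : List Int), Dom_twoStacks maxSum a b → Spec_twoStacks maxSum a b (twoStacks maxSum a b)

-- ===== LEMMAS AND PROOFS =====
theorem twoStacksLoop_right (maxSum : Int) (b : List Int) :
    ∀ sum count, twoStacksLoop maxSum [] b sum count = scanCount maxSum b sum count := by
  induction b with
  | nil => intro sum count; simp [twoStacksLoop, scanCount]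
  | cons y ys ih =>
      intro sum count
      simp only [twoStacksLoop, scanCount]
      split
      · rfl
      · exact ih _ _

theorem twoStacksLoop_left (maxSum : Int) (a : List Int) :
    ∀ sum count, twoStacksLoop maxSum a [] sum count = scanCount maxSum a sum count := by
  induction a with
  | nil => intro sum count; simp [twoStacksLoop, scanCount]
  | cons x xs ih =>
      intro sum count
      simp only [twoStacksLoop, scanCount]
      split
      · rfl
      · exact ih _ _

theorem twoStacksLoop_eq_scan (maxSum : Int) (a b : List Int) :
    ∀ sum count, twoStacksLoop maxSum a b sum count = scanCount maxSum (mergeAB a b) sum count := by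
  induction a, b using mergeAB.induct with
  | case1 b =>
      intro sum count
      simpa [mergeAB] using twoStacksLoop_right maxSum b sum count
  | case2 a h =>
      intro sum count
      cases a with
      | nil => simp [twoStacksLoop, mergeAB, scanCount]
      | cons x xs =>
          simpa [mergeAB] using twoStacksLoop_left maxSum (x :: xs) sum count
  | case3 x xs y ys hle ih =>
      intro sum count
      simp only [twoStacksLoop, mergeAB, if_pos hle, scanCount]
      split
      · rfl
      · exact ih _ _
  | case4 x xs y ys hle ih =>
      intro sum count
      simp only [twoStacksLoop, mergeAB, if_neg hle, scanCount]
      split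
      · rfl
      · exact ih _ _

-- ===== VERDICT (by name: the statement is the Claim_ definition above) =====
theorem twoStacks_spec : Claim_equal_twoStacks := by
  intro maxSum a b _
  unfold Spec_twoStacks twoStacks twoStacks_alt
  exact twoStacksLoop_eq_scan maxSum a b 0 0
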